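-- pv_equiv track=rewrite | github.com/parton-quark/Multiplexed_HGP | multiplexing_VH_decoder.py | deterministically_assign_qubits_to_photons
-- ===== SOURCE A (Python) =====
-- def deterministically_assign_qubits_to_photons(num_multiplexing,num_photons):
--     # Row-Col photon assignment strategy
--
--     num_qubits = num_multiplexing * num_photons
--     qubits = [i for i in range(num_qubits)]
--     photons = []
--
--     for j in range(num_photons):
--         qubits_in_photon = []
--         for k in range(num_multiplexing):
--             picked_qubit = qubits[0]
--             qubits_in_photon.append(picked_qubit)
--             qubits.remove(picked_qubit)
--         photons.append(qubits_in_photon)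
--     return photons
-- ===== SOURCE B (Python) =====
-- def deterministically_assign_qubits_to_photons(num_multiplexing, num_photons):
--     # Direct block slicing: photon j gets qubits j*m .. (j+1)*m - 1.
--     return [list(range(j * num_multiplexing, (j + 1) * num_multiplexing))
--             for j in range(num_photons)]
-- ===== Notes on version B (the rewrite author's own statement) =====
-- stated objective: faster
-- what changed: Replaces the mutable qubit list with repeated list.remove scans by directly generating each photon's contiguous index block as range(j*m,(j+1)*m).
import Mathlib
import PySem

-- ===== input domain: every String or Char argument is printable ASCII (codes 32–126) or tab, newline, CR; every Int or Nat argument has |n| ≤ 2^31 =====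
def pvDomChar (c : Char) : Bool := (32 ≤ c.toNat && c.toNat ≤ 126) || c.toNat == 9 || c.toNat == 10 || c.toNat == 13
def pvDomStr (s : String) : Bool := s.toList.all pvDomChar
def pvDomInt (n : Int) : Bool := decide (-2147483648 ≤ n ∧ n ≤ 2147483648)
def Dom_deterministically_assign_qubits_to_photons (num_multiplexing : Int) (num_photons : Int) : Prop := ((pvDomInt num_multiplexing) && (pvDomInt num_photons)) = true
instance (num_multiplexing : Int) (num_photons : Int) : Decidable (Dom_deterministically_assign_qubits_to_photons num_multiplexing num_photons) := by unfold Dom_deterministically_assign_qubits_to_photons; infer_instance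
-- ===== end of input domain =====

-- B replaces A's quadratic pop-and-remove accumulation with direct generation of each
-- contiguous index block range(j*m, (j+1)*m); this file proves the return values equal everywhere.

-- ===== PORT A =====
-- inner-loop body: picked = qubits[0]; qubits_in_photon.append(picked); qubits.remove(picked)
def pvInnerStepA (st : List Int × List Int) (_k : Int) : List Int × List Int :=
  match PySem.List.pyGet? st.1 0 with
  | none => st   -- Python would raise IndexError here; unreachable for every (Int,Int) input
  | some picked => ((PySem.List.remove? st.1 picked).getD st.1, st.2 ++ [picked])

-- outer-loop body: run the inner loop starting from qubits and [], append the photon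
def pvOuterStepA (num_multiplexing : Int) (st : List Int × List (List Int)) (_j : Int) :
    List Int × List (List Int) :=
  let inner := (PySem.List.pyRange 0 num_multiplexing 1).foldl pvInnerStepA (st.1, ([] : List Int))
  (inner.1, st.2 ++ [inner.2])

def deterministically_assign_qubits_to_photons (num_multiplexing : Int) (num_photons : Int) : List (List Int) :=
  let num_qubits := num_multiplexing * num_photons
  let qubits := PySem.List.pyRange 0 num_qubits 1
  ((PySem.List.pyRange 0 num_photons 1).foldl (pvOuterStepA num_multiplexing)
    (qubits, ([] : List (List Int)))).2

-- ===== PORT B =====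
def deterministically_assign_qubits_to_photons_alt (num_multiplexing : Int) (num_photons : Int) : List (List Int) :=
  (PySem.List.pyRange 0 num_photons 1).map
    (fun j => PySem.List.pyRange (j * num_multiplexing) ((j + 1) * num_multiplexing) 1)

-- ===== PRECONDITION & SPEC =====
def Spec_deterministically_assign_qubits_to_photons (num_multiplexing : Int) (num_photons : Int) (out : List (List Int)) : Prop := out = deterministically_assign_qubits_to_photons_alt num_multiplexing num_photons
instance (num_multiplexing : Int) (num_photons : Int) (out : List (List Int)) : Decidable (Spec_deterministically_assign_qubits_to_photons num_multiplexing num_photons out) := by unfold Spec_deterministically_assign_qubits_to_photons; infer_instance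

-- ===== CLAIM (what is proved, stated in full; the proofs are below) =====
def Claim_equal_deterministically_assign_qubits_to_photons : Prop := ∀ (num_multiplexing : Int) (num_photons : Int), Dom_deterministically_assign_qubits_to_photons num_multiplexing num_photons → Spec_deterministically_assign_qubits_to_photons num_multiplexing num_photons (deterministically_assign_qubits_to_photons num_multiplexing num_photons)

-- ===== LEMMAS AND PROOFS =====

-- The inner loop peels the first l.length elements off a consecutive range.
lemma pvInner_fold (l : List Int) : ∀ (a b : Int) (acc : List Int),
    a + l.length ≤ b →
    l.foldl pvInnerStepA (PySem.List.pyRange a b 1, acc)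
      = (PySem.List.pyRange (a + l.length) b 1, acc ++ PySem.List.pyRange a (a + l.length) 1) := by
  induction l with
  | nil =>
      intro a b acc _h
      simp [PySem.List.pyRange_one_eq_nil (le_refl a)]
  | cons x l ih =>
      intro a b acc h
      have hab : a < b := by
        have : (0:Int) ≤ l.length := by positivity
        simp at h; omega
      rw [PySem.List.pyRange_one_cons hab]
      have hstep : pvInnerStepA (a :: PySem.List.pyRange (a+1) b 1, acc) x
          = (PySem.List.pyRange (a+1) b 1, acc ++ [a]) := by
        simp [pvInnerStepA, PySem.List.pyGet?, PySem.List.pyIdx?]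
      simp only [List.foldl_cons, hstep]
      have h' : (a + 1) + (l.length : Int) ≤ b := by
        simp at h ⊢; omega
      rw [ih (a+1) b (acc ++ [a]) h']
      rw [show a + (((x :: l).length : Nat) : Int) = (a+1) + ((l.length : Nat) : Int) from by
        simp only [List.length_cons]; push_cast; ring]
      rw [PySem.List.pyRange_one_cons (show a < (a+1) + ((l.length : Nat) : Int) by omega)]
      simp

-- m ≤ 0: every photon is empty; the outer fold just appends [] per iteration.
lemma pvOuter_fold_nonpos (m : Int) (hm : m ≤ 0) (l : List Int) :
    ∀ (qs : List Int) (acc : List (List Int)),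
    l.foldl (pvOuterStepA m) (qs, acc) = (qs, acc ++ l.map (fun _ => ([] : List Int))) := by
  induction l with
  | nil => intro qs acc; simp
  | cons x l ih =>
      intro qs acc
      simp only [List.foldl_cons, List.map_cons]
      rw [show pvOuterStepA m (qs, acc) x = (qs, acc ++ [[]]) by
        simp [pvOuterStepA, PySem.List.pyRange_one_eq_nil hm]]
      rw [ih qs (acc ++ [[]])]
      simp

-- m > 0: outer-loop invariant, counting down the remaining photons.
lemma pvOuter_fold_pos (m p : Int) (hm : 0 < m) :
    ∀ (n : Nat) (j0 : Int) (acc : List (List Int)), p - j0 = (n : Int) →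
    (PySem.List.pyRange j0 p 1).foldl (pvOuterStepA m)
        (PySem.List.pyRange (j0 * m) (p * m) 1, acc)
      = (PySem.List.pyRange (p * m) (p * m) 1,
         acc ++ (PySem.List.pyRange j0 p 1).map
           (fun j => PySem.List.pyRange (j * m) ((j + 1) * m) 1)) := by
  intro n
  induction n with
  | zero =>
      intro j0 acc h
      have : j0 = p := by omega
      subst this
      simp [PySem.List.pyRange_one_eq_nil (le_refl j0)]
  | succ n ih =>
      intro j0 acc h
      have hjp : j0 < p := by omega
      rw [PySem.List.pyRange_one_cons hjp]
      simp only [List.foldl_cons, List.map_cons]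
      have hlen : ((PySem.List.pyRange 0 m 1).length : Int) = m := by
        rw [PySem.List.length_pyRange_one]; omega
      have hinner := pvInner_fold (PySem.List.pyRange 0 m 1) (j0 * m) (p * m) []
        (by rw [hlen]; nlinarith)
      have hstep : pvOuterStepA m (PySem.List.pyRange (j0 * m) (p * m) 1, acc) j0
          = (PySem.List.pyRange ((j0 + 1) * m) (p * m) 1,
             acc ++ [PySem.List.pyRange (j0 * m) ((j0 + 1) * m) 1]) := by
        simp only [pvOuterStepA, hinner, hlen]
        simp only [List.nil_append, Prod.mk.injEq]
        constructor
        · congr 2; ring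
        · congr 3; ring
      rw [hstep, ih (j0 + 1) _ (by omega)]
      simp

-- ===== VERDICT (by name: the statement is the Claim_ definition above) =====
theorem deterministically_assign_qubits_to_photons_spec : Claim_equal_deterministically_assign_qubits_to_photons := by
  intro m p _dom
  unfold Spec_deterministically_assign_qubits_to_photons
  show ((PySem.List.pyRange 0 p 1).foldl (pvOuterStepA m)
      (PySem.List.pyRange 0 (m * p) 1, ([] : List (List Int)))).2 = _
  by_cases hp : 0 < p
  · by_cases hm : 0 < m
    · rw [show (PySem.List.pyRange 0 (m * p) 1) = PySem.List.pyRange ((0:Int) * m) (p * m) 1 by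
        norm_num [mul_comm]]
      rw [pvOuter_fold_pos m p hm p.toNat 0 [] (by omega)]
      simp [deterministically_assign_qubits_to_photons_alt]
    · rw [pvOuter_fold_nonpos m (by omega)]
      simp only [List.nil_append, deterministically_assign_qubits_to_photons_alt]
      apply List.map_congr_left
      intro j _hj
      rw [PySem.List.pyRange_one_eq_nil (by nlinarith)]
  · rw [PySem.List.pyRange_one_eq_nil (by omega : p ≤ 0)]
    simp [deterministically_assign_qubits_to_photons_alt,
      PySem.List.pyRange_one_eq_nil (by omega : p ≤ (0:Int))]
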